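-- pv_equiv track=rewrite | github.com/Koni2020/PCEA | PCEA/cea_core.py | find_consecutive
-- ===== SOURCE A (Python) =====
-- def find_consecutive(seq: list, delta: int, max_gap_length: int, max_gap_count: int) -> list[tuple]:
--     """
--     Find consecutive sequences of True values in a binary sequence, considering gaps between the sequences.
--
--     :param seq: A list of boolean values (True/False) representing the sequence to be analyzed.
--     :param delta: Minimum length of the consecutive True sequence to be considered valid.
--     :param max_gap_length: Maximum allowed length of consecutive False values (gaps) within a sequence.
--     :param max_gap_count: Maximum number of consecutive False values allowed (the number of breaks) within a sequence.
--     :return: A list of tuples, where each tuple contains the start and end index of a valid consecutive sequence.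
--     """
--     result = []  # List to store the valid consecutive sequences as tuples of (start, end)
--     n = len(seq)  # Length of the input sequence
--     i = 0  # Index pointer to traverse through the sequence
--
--     # Traverse through the sequence
--     while i < n:
--         if seq[i]:  # If the current element is True (1)
--             start = i  # Mark the start of the current subsequence
--             broken = 0  # Counter to keep track of the number of breaks (False values)
--             gap_length = 0  # Counter for the length of the current gap of False values
--             last_true_index = i  # The index of the last encountered True value
--
--             while i < n:
--                 if seq[i]:  # If the current element is True
--                     last_true_index = i  # Update the last True index
--                     gap_length = 0  # Reset the gap length as we're encountering a True value
--                 else:  # If the current element is False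
--                     gap_length += 1  # Increment the gap length
--                     if gap_length > max_gap_length:  # If the gap length exceeds the allowed maximum
--                         break  # Break the loop, as this sequence is no longer valid
--                     broken += 1  # Increment the number of breaks (False values encountered)
--                     if broken > max_gap_count:  # If the number of breaks exceeds the allowed maximum
--                         break  # Break the loop, as this sequence is no longer valid
--
--                 # If the gap length or the number of breaks exceeds the limits, break the inner loop
--                 if gap_length > max_gap_length or broken > max_gap_count:
--                     break
--
--                 i += 1  # Move to the next index
--
--             end = last_true_index  # The index of the last True value in the current sequence
--             result.append((start, end))  # Add the current valid subsequence to the result as a tuple (start, end)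
--         else:
--             i += 1  # Skip the False value and move to the next index
--
--     # Filter the results to only include subsequences that meet the minimum length requirement (delta)
--     result_filter = [x for x in result if (x[1] - x[0] + 1) >= delta]
--     return result_filter  # Return the filtered list of consecutive subsequences
-- ===== SOURCE B (Python) =====
-- def find_consecutive(seq: list, delta: int, max_gap_length: int, max_gap_count: int) -> list[tuple]:
--     # B: run-length encode the True runs once, then greedily merge runs across
--     # gaps that fit both limits (cumulative false count), then length-filter.
--     runs = []          # maximal True runs as (start, end)
--     start = None
--     for i, v in enumerate(seq):
--         if v:
--             if start is None:
--                 start = i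
--         else:
--             if start is not None:
--                 runs.append((start, i - 1))
--                 start = None
--     if start is not None:
--         runs.append((start, len(seq) - 1))
--
--     groups = []
--     cur = None         # open group: (cs, ce, broken)
--     for s, e in runs:
--         if cur is None:
--             cur = (s, e, 0)
--         else:
--             cs, ce, broken = cur
--             g = s - ce - 1
--             if g <= max_gap_length and broken + g <= max_gap_count:
--                 cur = (cs, e, broken + g)
--             else:
--                 groups.append((cs, ce))
--                 cur = (s, e, 0)
--     if cur is not None:
--         groups.append((cur[0], cur[1]))
--
--     return [(s, e) for s, e in groups if e - s + 1 >= delta]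
-- ===== Notes on version B (the rewrite author's own statement) =====
-- stated objective: alternative
-- what changed: B replaces A's nested index-walking while-loops by a two-phase decomposition: one pass run-length-encodes the maximal True runs, a second pass greedily merges runs across gaps that fit both limits (cumulative false count), then a final length filter; Pre_ excludes inputs where A loops forever (negative gap limits with a True present).
import Mathlib
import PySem

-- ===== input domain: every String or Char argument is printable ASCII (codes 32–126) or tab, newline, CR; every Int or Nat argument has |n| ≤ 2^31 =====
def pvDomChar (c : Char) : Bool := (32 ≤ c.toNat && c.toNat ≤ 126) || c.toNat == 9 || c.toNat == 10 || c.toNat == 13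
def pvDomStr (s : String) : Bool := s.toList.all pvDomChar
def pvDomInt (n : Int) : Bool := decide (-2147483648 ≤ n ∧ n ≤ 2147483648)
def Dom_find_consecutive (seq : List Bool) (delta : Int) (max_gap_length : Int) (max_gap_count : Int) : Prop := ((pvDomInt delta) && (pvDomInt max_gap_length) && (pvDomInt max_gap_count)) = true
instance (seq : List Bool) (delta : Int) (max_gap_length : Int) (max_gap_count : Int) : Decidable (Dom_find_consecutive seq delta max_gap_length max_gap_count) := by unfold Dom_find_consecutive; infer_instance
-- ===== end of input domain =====

-- B replaces A's nested index-walking while-loops by a run-length-encode + greedy-merge + filter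
-- decomposition (alternative, same cost); Pre_ excludes the inputs on which A loops forever.


-- ===== PORT A =====
-- inner while-loop of A: walks from index i with state (broken, gap_length, last_true_index);
-- returns (exit index, last_true_index)
def pvAInner (seq : List Bool) (mgl mgc : Int) (i : Nat) (broken gap : Int) (ltrue : Nat) : Nat × Nat :=
  if i < seq.length then
    if seq.getD i false then
      -- last_true_index = i; gap_length = 0; then the combined break check
      if (0 : Int) > mgl ∨ broken > mgc then (i, i)
      else pvAInner seq mgl mgc (i + 1) broken 0 i
    else
      if gap + 1 > mgl then (i, ltrue)
      else if broken + 1 > mgc then (i, ltrue)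
      else if gap + 1 > mgl ∨ broken + 1 > mgc then (i, ltrue)  -- A's redundant combined check
      else pvAInner seq mgl mgc (i + 1) (broken + 1) (gap + 1) ltrue
  else (i, ltrue)
termination_by seq.length - i

-- outer while-loop of A; Python's loop does not terminate when a gap limit is negative and a
-- True is present, so the port carries fuel (enough fuel is exact on all terminating inputs)
def pvAOuter (seq : List Bool) (mgl mgc : Int) : Nat → Nat → List (Int × Int)
  | 0, _ => []
  | fuel + 1, i =>
    if i < seq.length then
      if seq.getD i false then
        ((i : Int), ((pvAInner seq mgl mgc i 0 0 i).2 : Int))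
          :: pvAOuter seq mgl mgc fuel (pvAInner seq mgl mgc i 0 0 i).1
      else pvAOuter seq mgl mgc fuel (i + 1)
    else []

def find_consecutive (seq : List Bool) (delta : Int) (max_gap_length : Int) (max_gap_count : Int) : List (Int × Int) :=
  (pvAOuter seq max_gap_length max_gap_count (seq.length + 1) 0).filter
    (fun x => decide (x.2 - x.1 + 1 ≥ delta))

-- ===== PORT B =====
-- first for-loop of B: run-length encoding state (runs, start_of_open_run)
def pvBRleStep (st : List (Int × Int) × Option Int) (p : Int × Bool) : List (Int × Int) × Option Int :=
  if p.2 then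
    match st.2 with
    | none => (st.1, some p.1)
    | some _ => st
  else
    match st.2 with
    | some s => (st.1 ++ [(s, p.1 - 1)], none)
    | none => st

def pvBRuns (seq : List Bool) : List (Int × Int) :=
  let st := (PySem.List.enumerate seq 0).foldl pvBRleStep ([], none)
  match st.2 with
  | some s => st.1 ++ [(s, (seq.length : Int) - 1)]
  | none => st.1

-- second for-loop of B: greedy merge state (groups, open group (cs, ce, broken))
def pvBMergeStep (mgl mgc : Int) (st : List (Int × Int) × Option (Int × Int × Int)) (r : Int × Int) :
    List (Int × Int) × Option (Int × Int × Int) :=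
  match st.2 with
  | none => (st.1, some (r.1, r.2, (0 : Int)))
  | some (cs, ce, broken) =>
    let g := r.1 - ce - 1
    if g ≤ mgl ∧ broken + g ≤ mgc then (st.1, some (cs, r.2, broken + g))
    else (st.1 ++ [(cs, ce)], some (r.1, r.2, (0 : Int)))

def pvBGroups (mgl mgc : Int) (runs : List (Int × Int)) : List (Int × Int) :=
  let st := runs.foldl (pvBMergeStep mgl mgc) ([], none)
  match st.2 with
  | some c => st.1 ++ [(c.1, c.2.1)]
  | none => st.1

def find_consecutive_alt (seq : List Bool) (delta : Int) (max_gap_length : Int) (max_gap_count : Int) : List (Int × Int) :=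
  (pvBGroups max_gap_length max_gap_count (pvBRuns seq)).filter
    (fun x => decide (x.2 - x.1 + 1 ≥ delta))

-- ===== PRECONDITION & SPEC =====
-- Pre_ excludes exactly the inputs on which Python A DIVERGES (infinite loop, no return): when
-- a gap limit is negative and the sequence contains a True, A's combined break check fires
-- without advancing i, so the outer loop re-enters the same True index forever.
def Pre_find_consecutive (seq : List Bool) (delta : Int) (max_gap_length : Int) (max_gap_count : Int) : Prop :=
  (0 ≤ max_gap_length ∧ 0 ≤ max_gap_count) ∨ true ∉ seq
instance (seq : List Bool) (delta : Int) (max_gap_length : Int) (max_gap_count : Int) : Decidable (Pre_find_consecutive seq delta max_gap_length max_gap_count) := by unfold Pre_find_consecutive; infer_instance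

def pvWitness_find_consecutive : List Bool × Int × Int × Int := ([true, false, true, true, false, false, true], 2, 1, 2)

def Spec_find_consecutive (seq : List Bool) (delta : Int) (max_gap_length : Int) (max_gap_count : Int) (out : List (Int × Int)) : Prop := out = find_consecutive_alt seq delta max_gap_length max_gap_count
instance (seq : List Bool) (delta : Int) (max_gap_length : Int) (max_gap_count : Int) (out : List (Int × Int)) : Decidable (Spec_find_consecutive seq delta max_gap_length max_gap_count out) := by unfold Spec_find_consecutive; infer_instance

-- ===== CLAIM (what is proved, stated in full; the proofs are below) =====
def Claim_equal_find_consecutive : Prop := ∀ (seq : List Bool) (delta : Int) (max_gap_length : Int) (max_gap_count : Int), Dom_find_consecutive seq delta max_gap_length max_gap_count → Pre_find_consecutive seq delta max_gap_length max_gap_count → Spec_find_consecutive seq delta max_gap_length max_gap_count (find_consecutive seq delta max_gap_length max_gap_count)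

-- ===== LEMMAS AND PROOFS =====

-- last index of the maximal True run starting at i
def pvRunEnd (seq : List Bool) (i : Nat) : Nat :=
  if h : i + 1 < seq.length then
    if seq.getD (i + 1) false then pvRunEnd seq (i + 1) else i
  else i
termination_by seq.length - i

theorem pv_le_runEnd (seq : List Bool) (i : Nat) : i ≤ pvRunEnd seq i := by
  fun_induction pvRunEnd seq i with
  | case1 i h hv ih => omega
  | case2 i h hv => omega
  | case3 i h => omega

-- the maximal True runs of seq at absolute positions ≥ i
def pvRunsFrom (seq : List Bool) (i : Nat) : List (Int × Int) :=
  if h : i < seq.length then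
    if seq.getD i false then
      ((i : Int), (pvRunEnd seq i : Int)) :: pvRunsFrom seq (pvRunEnd seq i + 1)
    else pvRunsFrom seq (i + 1)
  else []
termination_by seq.length - i
decreasing_by
  · have := pv_le_runEnd seq i; omega
  · omega

-- recursive forms of B's merge loop
def pvMergeLoop (mgl mgc : Int) : List (Int × Int) → Int → Int → Int → List (Int × Int)
  | [], cs, ce, _ => [(cs, ce)]
  | r :: rest, cs, ce, b =>
    if r.1 - ce - 1 ≤ mgl ∧ b + (r.1 - ce - 1) ≤ mgc then
      pvMergeLoop mgl mgc rest cs r.2 (b + (r.1 - ce - 1))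
    else (cs, ce) :: pvMergeLoop mgl mgc rest r.1 r.2 0

def pvMergeAll (mgl mgc : Int) : List (Int × Int) → List (Int × Int)
  | [] => []
  | r :: rest => pvMergeLoop mgl mgc rest r.1 r.2 0

-- structural (list-shaped) forms of the RLE, closed/open run state
mutual
def pvRunsC : List Bool → Int → List (Int × Int)
  | [], _ => []
  | b :: t, p => if b then pvRunsO t (p + 1) p else pvRunsC t (p + 1)
def pvRunsO : List Bool → Int → Int → List (Int × Int)
  | [], p, s => [(s, p - 1)]
  | b :: t, p, s => if b then pvRunsO t (p + 1) s else (s, p - 1) :: pvRunsC t (p + 1)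
end

-- closing step of B's first for-loop (the 'if start is not None' after the loop)
def pvCloseR (endPos : Int) (st : List (Int × Int) × Option Int) : List (Int × Int) :=
  match st.2 with
  | some s => st.1 ++ [(s, endPos - 1)]
  | none => st.1

-- closing step of B's second for-loop
def pvCloseG (st : List (Int × Int) × Option (Int × Int × Int)) : List (Int × Int) :=
  match st.2 with
  | some c => st.1 ++ [(c.1, c.2.1)]
  | none => st.1

theorem pv_rle_fold : ∀ (l : List Bool) (p : Int) (acc : List (Int × Int)),
    (pvCloseR (p + l.length) ((PySem.List.enumerate l p).foldl pvBRleStep (acc, none)) = acc ++ pvRunsC l p)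
    ∧ (∀ s, pvCloseR (p + l.length) ((PySem.List.enumerate l p).foldl pvBRleStep (acc, some s)) = acc ++ pvRunsO l p s) := by
  intro l
  induction l with
  | nil =>
    intro p acc
    refine ⟨by simp [PySem.List.enumerate_nil, pvCloseR, pvRunsC], fun s => ?_⟩
    simp [PySem.List.enumerate_nil, pvCloseR, pvRunsO]
  | cons b t ih =>
    intro p acc
    have hpos : p + ((b :: t).length : Int) = (p + 1) + (t.length : Int) := by push_cast [List.length_cons]; ring
    rw [PySem.List.enumerate_cons]
    cases b with
    | true =>
      refine ⟨?_, fun s => ?_⟩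
      · simp only [List.foldl_cons, pvBRleStep, reduceIte, Bool.false_eq_true, if_false, hpos]
        rw [(ih (p + 1) acc).2 p]
        simp [pvRunsC, pvRunsO]
      · simp only [List.foldl_cons, pvBRleStep, reduceIte, Bool.false_eq_true, if_false, hpos]
        rw [(ih (p + 1) acc).2 s]
        simp [pvRunsC, pvRunsO]
    | false =>
      refine ⟨?_, fun s => ?_⟩
      · simp only [List.foldl_cons, pvBRleStep, reduceIte, Bool.false_eq_true, if_false, hpos]
        rw [(ih (p + 1) acc).1]
        simp [pvRunsC, pvRunsO]
      · simp only [List.foldl_cons, pvBRleStep, reduceIte, Bool.false_eq_true, if_false, hpos]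
        rw [(ih (p + 1) (acc ++ [(s, p - 1)])).1]
        simp [pvRunsC, pvRunsO]

theorem pv_bruns_eq (seq : List Bool) : pvBRuns seq = pvRunsC seq 0 := by
  have h := (pv_rle_fold seq 0 []).1
  simpa [pvBRuns, pvCloseR, List.nil_append] using h

theorem pv_merge_fold (mgl mgc : Int) : ∀ (runs : List (Int × Int)) (acc : List (Int × Int)) (cs ce b : Int),
    pvCloseG (runs.foldl (pvBMergeStep mgl mgc) (acc, some (cs, ce, b))) = acc ++ pvMergeLoop mgl mgc runs cs ce b := by
  intro runs
  induction runs with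
  | nil => intro acc cs ce b; simp [pvCloseG, pvMergeLoop]
  | cons r rest ih =>
    intro acc cs ce b
    simp only [List.foldl_cons, pvBMergeStep]
    by_cases h : r.1 - ce - 1 ≤ mgl ∧ b + (r.1 - ce - 1) ≤ mgc
    · simp only [if_pos h]
      rw [ih, pvMergeLoop, if_pos h]
    · simp only [if_neg h]
      rw [ih, pvMergeLoop, if_neg h]
      simp

theorem pv_bgroups_eq (mgl mgc : Int) (runs : List (Int × Int)) :
    pvBGroups mgl mgc runs = pvMergeAll mgl mgc runs := by
  cases runs with
  | nil => simp [pvBGroups, pvMergeAll]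
  | cons r rest =>
    have h := pv_merge_fold mgl mgc rest [] r.1 r.2 0
    simpa [pvBGroups, pvBMergeStep, pvCloseG, pvMergeAll] using h

theorem pv_getD_true_lt {seq : List Bool} {j : Nat} (h : seq.getD j false = true) : j < seq.length := by
  by_contra hc
  rw [List.getD_eq_default seq false (by omega)] at h
  exact Bool.false_ne_true h

theorem pv_runs_eq_top (seq : List Bool) (i : Nat) (hn : seq.length ≤ i) :
    (pvRunsC (seq.drop i) (i : Int) = pvRunsFrom seq i)
    ∧ (∀ s : Int, 0 < i → seq.getD (i - 1) false = true →
        pvRunsO (seq.drop i) (i : Int) s = (s, (pvRunEnd seq (i - 1) : Int)) :: pvRunsFrom seq (pvRunEnd seq (i - 1) + 1)) := by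
  have hdrop : seq.drop i = [] := List.drop_eq_nil_of_le hn
  constructor
  · rw [hdrop, pvRunsC, pvRunsFrom]
    simp [Nat.not_lt.2 hn]
  · intro s hi hv
    have h1 : i - 1 < seq.length := pv_getD_true_lt hv
    have he : pvRunEnd seq (i - 1) = i - 1 := by
      rw [pvRunEnd]
      rw [dif_neg (by omega)]
    rw [hdrop, pvRunsO, he]
    have h2 : pvRunsFrom seq (i - 1 + 1) = [] := by
      rw [pvRunsFrom]
      rw [dif_neg (by omega)]
    rw [h2]
    have : ((i : Int)) - 1 = ((i - 1 : Nat) : Int) := by omega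
    rw [this]

theorem pv_runs_eq_aux (seq : List Bool) : ∀ (m i : Nat), seq.length - i ≤ m →
    (pvRunsC (seq.drop i) (i : Int) = pvRunsFrom seq i)
    ∧ (∀ s : Int, 0 < i → seq.getD (i - 1) false = true →
        pvRunsO (seq.drop i) (i : Int) s = (s, (pvRunEnd seq (i - 1) : Int)) :: pvRunsFrom seq (pvRunEnd seq (i - 1) + 1)) := by
  intro m
  induction m with
  | zero => intro i h; exact pv_runs_eq_top seq i (by omega)
  | succ m ihm =>
    intro i h
    by_cases hn : i < seq.length
    · have hdrop : seq.drop i = seq[i] :: seq.drop (i + 1) := List.drop_eq_getElem_cons hn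
      have hget : seq.getD i false = seq[i] := List.getD_eq_getElem seq false hn
      have hc1 : ((i : Int)) + 1 = ((i + 1 : Nat) : Int) := by omega
      have ih := ihm (i + 1) (by omega)
      constructor
      · rw [hdrop, pvRunsC]
        cases hv : seq[i] with
        | false =>
          rw [if_neg (by simp), hc1, ih.1]
          conv_rhs => rw [pvRunsFrom]
          rw [dif_pos hn, if_neg (by rw [hget, hv]; simp)]
        | true =>
          rw [if_pos rfl, hc1, ih.2 (i : Int) (by omega) (by simpa using hget.trans hv)]
          conv_rhs => rw [pvRunsFrom]
          rw [dif_pos hn, if_pos (by rw [hget, hv])]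
          simp
      · intro s hi hv0
        rw [hdrop, pvRunsO]
        cases hv : seq[i] with
        | true =>
          rw [if_pos rfl, hc1, ih.2 s (by omega) (by simpa using hget.trans hv)]
          have he : pvRunEnd seq (i - 1) = pvRunEnd seq i := by
            rw [pvRunEnd]
            have h1 : i - 1 + 1 = i := by omega
            rw [dif_pos (by omega)]
            rw [if_pos (by rw [h1, hget, hv])]
            rw [h1]
          rw [he]
          simp
        | false =>
          rw [if_neg (by simp), hc1, ih.1]
          have he : pvRunEnd seq (i - 1) = i - 1 := by
            rw [pvRunEnd]
            have h1 : i - 1 + 1 = i := by omega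
            by_cases h2 : i - 1 + 1 < seq.length
            · rw [dif_pos h2, if_neg (by rw [h1, hget, hv]; simp)]
            · rw [dif_neg h2]
          rw [he]
          have h3 : pvRunsFrom seq (i - 1 + 1) = pvRunsFrom seq (i + 1) := by
            have h1 : i - 1 + 1 = i := by omega
            rw [h1, pvRunsFrom, dif_pos hn, if_neg (by rw [hget, hv]; simp)]
          rw [h3]
          have : ((i : Int)) - 1 = ((i - 1 : Nat) : Int) := by omega
          rw [this]
    · exact pv_runs_eq_top seq i (by omega)

theorem pv_alt_eq (seq : List Bool) (delta mgl mgc : Int) :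
    find_consecutive_alt seq delta mgl mgc
      = (pvMergeAll mgl mgc (pvRunsFrom seq 0)).filter (fun x => decide (x.2 - x.1 + 1 ≥ delta)) := by
  have h0 : pvRunsC seq 0 = pvRunsFrom seq 0 := by
    have := (pv_runs_eq_aux seq seq.length 0 (by omega)).1
    simpa using this
  rw [find_consecutive_alt, pv_bgroups_eq, pv_bruns_eq, h0]

theorem pv_runEnd_lt {seq : List Bool} {i : Nat} (h : i < seq.length) : pvRunEnd seq i < seq.length := by
  fun_induction pvRunEnd seq i with
  | case1 i h1 hv ih => exact ih h1
  | case2 i h1 hv => exact h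
  | case3 i h1 => exact h

theorem pv_runEnd_true {seq : List Bool} {i : Nat} (h : seq.getD i false = true) :
    seq.getD (pvRunEnd seq i) false = true := by
  fun_induction pvRunEnd seq i with
  | case1 i h1 hv ih => exact ih hv
  | case2 i h1 hv => exact h
  | case3 i h1 => exact h

theorem pv_runEnd_succ_false (seq : List Bool) (i : Nat) :
    seq.getD (pvRunEnd seq i + 1) false = false := by
  fun_induction pvRunEnd seq i with
  | case1 i h1 hv ih => exact ih
  | case2 i h1 hv => simpa using hv
  | case3 i h1 => exact List.getD_eq_default seq false (by omega)

theorem pv_runsFrom_false {seq : List Bool} {i : Nat} (hn : i < seq.length)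
    (hv : seq.getD i false = false) : pvRunsFrom seq i = pvRunsFrom seq (i + 1) := by
  rw [pvRunsFrom, dif_pos hn, if_neg (by rw [hv]; simp)]

theorem pv_runsFrom_true {seq : List Bool} {i : Nat} (hn : i < seq.length)
    (hv : seq.getD i false = true) :
    pvRunsFrom seq i = ((i : Int), (pvRunEnd seq i : Int)) :: pvRunsFrom seq (pvRunEnd seq i + 1) := by
  rw [pvRunsFrom, dif_pos hn, if_pos hv]

theorem pv_runsFrom_nil {seq : List Bool} {i : Nat} (hn : seq.length ≤ i) :
    pvRunsFrom seq i = [] := by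
  rw [pvRunsFrom, dif_neg (by omega)]

theorem pv_runsFrom_head_ge_aux (seq : List Bool) : ∀ (m i : Nat), seq.length - i ≤ m →
    ∀ (r : Int × Int) (rest : List (Int × Int)), pvRunsFrom seq i = r :: rest → (i : Int) ≤ r.1 := by
  intro m
  induction m with
  | zero =>
    intro i hm r rest h
    rw [pv_runsFrom_nil (by omega)] at h
    exact absurd h (by simp)
  | succ m ihm =>
    intro i hm r rest h
    by_cases hn : i < seq.length
    · cases hv : seq.getD i false with
      | true =>
        rw [pv_runsFrom_true hn hv] at h
        injection h with h2 _
        rw [← h2]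
      | false =>
        rw [pv_runsFrom_false hn hv] at h
        have := ihm (i + 1) (by omega) r rest h
        push_cast at this ⊢
        omega
    · rw [pv_runsFrom_nil (by omega)] at h
      exact absurd h (by simp)

theorem pv_runsFrom_head_ge {seq : List Bool} {i : Nat} {r : Int × Int} {rest : List (Int × Int)}
    (h : pvRunsFrom seq i = r :: rest) : (i : Int) ≤ r.1 :=
  pv_runsFrom_head_ge_aux seq seq.length i (by omega) r rest h


theorem pv_aInner_fst_ge (seq : List Bool) (mgl mgc : Int) :
    ∀ (i : Nat) (b g : Int) (l2 : Nat), i ≤ (pvAInner seq mgl mgc i b g l2).1 := by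
  intro i b g l2
  fun_induction pvAInner seq mgl mgc i b g l2 <;> simp_all <;> omega

theorem pv_runwalk (seq : List Bool) (mgl mgc : Int) (hmgl : 0 ≤ mgl) :
    ∀ (m i : Nat) (b : Int), seq.length - i ≤ m → seq.getD i false = true → b ≤ mgc →
      pvAInner seq mgl mgc (i + 1) b 0 i
        = pvAInner seq mgl mgc (pvRunEnd seq i + 1) b 0 (pvRunEnd seq i) := by
  intro m
  induction m with
  | zero => intro i b h hv _; exact absurd (pv_getD_true_lt hv) (by omega)
  | succ m ihm =>
    intro i b h hv hb
    by_cases h2 : i + 1 < seq.length ∧ seq.getD (i + 1) false = true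
    · have he : pvRunEnd seq i = pvRunEnd seq (i + 1) := by
        rw [pvRunEnd, dif_pos h2.1, if_pos h2.2]
      have hstep : pvAInner seq mgl mgc (i + 1) b 0 i = pvAInner seq mgl mgc (i + 1 + 1) b 0 (i + 1) := by
        rw [pvAInner, if_pos h2.1, if_pos h2.2, if_neg (by push_neg; omega)]
      rw [he, hstep]
      exact ihm (i + 1) b (by omega) h2.2 hb
    · have he : pvRunEnd seq i = i := by
        rw [pvRunEnd]
        by_cases h3 : i + 1 < seq.length
        · rw [dif_pos h3, if_neg (fun hc => h2 ⟨h3, hc⟩)]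
        · rw [dif_neg h3]
      rw [he]

theorem pv_main (seq : List Bool) (mgl mgc : Int) (hmgl : 0 ≤ mgl) (hmgc : 0 ≤ mgc) :
    ∀ (fuel : Nat) (lt : Nat) (b : Int),
      seq.length - lt ≤ fuel →
      seq.getD lt false = true →
      seq.getD (lt + 1) false = false →
      0 ≤ b → b ≤ mgc →
      ∀ cs : Int,
        (cs, ((pvAInner seq mgl mgc (lt + 1) b 0 lt).2 : Int)) ::
            pvMergeAll mgl mgc (pvRunsFrom seq ((pvAInner seq mgl mgc (lt + 1) b 0 lt).1))
          = pvMergeLoop mgl mgc (pvRunsFrom seq (lt + 1)) cs (lt : Int) b := by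
  intro fuel
  induction fuel with
  | zero => intro lt b h hv _ _ _ _; exact absurd (pv_getD_true_lt hv) (by omega)
  | succ fuel ih =>
    intro lt b0 hfuel hltv hmax hb0 hbc
    have gap : ∀ (m : Nat) (i : Nat) (b k : Int), seq.length - i ≤ m → lt < i → i ≤ seq.length →
        (∀ j : Nat, lt < j → j < i → seq.getD j false = false) →
        k = (i : Int) - (lt : Int) - 1 → k ≤ mgl → k ≤ b → b ≤ mgc →
        ∀ cs : Int,
          (cs, ((pvAInner seq mgl mgc i b k lt).2 : Int)) ::
              pvMergeAll mgl mgc (pvRunsFrom seq ((pvAInner seq mgl mgc i b k lt).1))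
            = pvMergeLoop mgl mgc (pvRunsFrom seq i) cs (lt : Int) (b - k) := by
      intro m
      induction m with
      | zero =>
        intro i b k hm hlti hin hfalse hk hkm hkb hbmc cs
        have hi : i = seq.length := by omega
        have hstop : pvAInner seq mgl mgc i b k lt = (i, lt) := by
          rw [pvAInner, if_neg (by omega)]
        rw [hstop, pv_runsFrom_nil (by omega)]
        simp [pvMergeAll, pvMergeLoop]
      | succ m ihm =>
        intro i b k hm hlti hin hfalse hk hkm hkb hbmc cs
        by_cases hn : i < seq.length
        · cases hv : seq.getD i false with
          | false =>
            by_cases h6 : k + 1 > mgl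
            · have hstop : pvAInner seq mgl mgc i b k lt = (i, lt) := by
                rw [pvAInner, if_pos hn, if_neg (by rw [hv]; simp), if_pos h6]
              rw [hstop, pv_runsFrom_false hn hv]
              rcases h5 : pvRunsFrom seq (i + 1) with _ | ⟨r, rest⟩
              · simp [pvMergeAll, pvMergeLoop]
              · have hge := pv_runsFrom_head_ge h5
                rw [pvMergeLoop, if_neg (by push_cast at hge; omega)]
                simp [pvMergeAll]
            · by_cases h7 : b + 1 > mgc
              · have hstop : pvAInner seq mgl mgc i b k lt = (i, lt) := by
                  rw [pvAInner, if_pos hn, if_neg (by rw [hv]; simp), if_neg h6, if_pos h7]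
                rw [hstop, pv_runsFrom_false hn hv]
                rcases h5 : pvRunsFrom seq (i + 1) with _ | ⟨r, rest⟩
                · simp [pvMergeAll, pvMergeLoop]
                · have hge := pv_runsFrom_head_ge h5
                  rw [pvMergeLoop, if_neg (by push_cast at hge; omega)]
                  simp [pvMergeAll]
              · have hstep : pvAInner seq mgl mgc i b k lt
                    = pvAInner seq mgl mgc (i + 1) (b + 1) (k + 1) lt := by
                  rw [pvAInner, if_pos hn, if_neg (by rw [hv]; simp), if_neg h6, if_neg h7,
                    if_neg (by push_neg; omega)]
                rw [hstep, pv_runsFrom_false hn hv]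
                have harr : b - k = (b + 1) - (k + 1) := by ring
                rw [harr]
                refine ihm (i + 1) (b + 1) (k + 1) (by omega) (by omega) (by omega) ?_
                  (by push_cast; omega) (by omega) (by omega) (by omega) cs
                intro j hj1 hj2
                by_cases hj : j = i
                · rwa [hj]
                · exact hfalse j hj1 (by omega)
          | true =>
            have hne : i ≠ lt + 1 := by
              intro heq
              rw [heq, hmax] at hv
              exact Bool.false_ne_true hv
            have hk1 : (1 : Int) ≤ k := by
              have : lt + 1 < i := by omega
              omega
            have hie : i ≤ pvRunEnd seq i := pv_le_runEnd seq i
            have hee : seq.getD (pvRunEnd seq i) false = true := pv_runEnd_true hv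
            have hef : seq.getD (pvRunEnd seq i + 1) false = false := pv_runEnd_succ_false seq i
            have hen : pvRunEnd seq i < seq.length := pv_runEnd_lt hn
            have hstep : pvAInner seq mgl mgc i b k lt = pvAInner seq mgl mgc (i + 1) b 0 i := by
              rw [pvAInner, if_pos hn, if_pos hv, if_neg (by push_neg; omega)]
            have hwalk := pv_runwalk seq mgl mgc hmgl seq.length i b (by omega) hv hbmc
            rw [hstep, hwalk]
            have hmain := ih (pvRunEnd seq i) b (by omega) hee hef (by omega) hbmc cs
            rw [hmain, pv_runsFrom_true hn hv]
            conv_rhs => rw [pvMergeLoop]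
            rw [if_pos (by constructor <;> [omega; (push_cast; omega)])]
            congr 1
            omega
        · have hi : i = seq.length := by omega
          have hstop : pvAInner seq mgl mgc i b k lt = (i, lt) := by
            rw [pvAInner, if_neg (by omega)]
          rw [hstop, pv_runsFrom_nil (by omega)]
          simp [pvMergeAll, pvMergeLoop]
    have := gap seq.length (lt + 1) b0 0 (by omega) (by omega) (by
        have := pv_getD_true_lt hltv; omega)
      (by intro j h1 h2; omega) (by push_cast; omega) hmgl (by omega) hbc
    simpa using this

theorem pv_outer_eq (seq : List Bool) (mgl mgc : Int) (hmgl : 0 ≤ mgl) (hmgc : 0 ≤ mgc) :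
    ∀ (fuel i : Nat), seq.length - i < fuel →
      pvAOuter seq mgl mgc fuel i = pvMergeAll mgl mgc (pvRunsFrom seq i) := by
  intro fuel
  induction fuel with
  | zero => intro i h; omega
  | succ fuel ih =>
    intro i h
    by_cases hn : i < seq.length
    · cases hv : seq.getD i false with
      | false =>
        rw [pvAOuter, if_pos hn, if_neg (by rw [hv]; simp), ih (i + 1) (by omega),
          pv_runsFrom_false hn hv]
      | true =>
        rw [pvAOuter, if_pos hn, if_pos hv]
        have hstep : pvAInner seq mgl mgc i 0 0 i = pvAInner seq mgl mgc (i + 1) 0 0 i := by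
          rw [pvAInner, if_pos hn, if_pos hv, if_neg (by push_neg; omega)]
        have hwalk := pv_runwalk seq mgl mgc hmgl seq.length i 0 (by omega) hv hmgc
        have hge : i + 1 ≤ (pvAInner seq mgl mgc i 0 0 i).1 := by
          rw [hstep]
          exact pv_aInner_fst_ge seq mgl mgc (i + 1) 0 0 i
        rw [ih (pvAInner seq mgl mgc i 0 0 i).1 (by omega), hstep, hwalk]
        have hee : seq.getD (pvRunEnd seq i) false = true := pv_runEnd_true hv
        have hmain := pv_main seq mgl mgc hmgl hmgc seq.length (pvRunEnd seq i) 0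
          (by omega) hee (pv_runEnd_succ_false seq i) le_rfl hmgc (i : Int)
        rw [hmain, pv_runsFrom_true hn hv, pvMergeAll]
    · rw [pvAOuter, if_neg hn, pv_runsFrom_nil (by omega)]
      simp [pvMergeAll]

theorem pv_outer_notrue (seq : List Bool) (mgl mgc : Int)
    (hall : ∀ j : Nat, seq.getD j false = false) :
    ∀ (fuel i : Nat), pvAOuter seq mgl mgc fuel i = [] := by
  intro fuel
  induction fuel with
  | zero => intro i; rw [pvAOuter]
  | succ fuel ih =>
    intro i
    rw [pvAOuter]
    by_cases hn : i < seq.length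
    · rw [if_pos hn, if_neg (by rw [hall i]; simp), ih]
    · rw [if_neg hn]

theorem pv_runsFrom_notrue (seq : List Bool)
    (hall : ∀ j : Nat, seq.getD j false = false) (i : Nat) : pvRunsFrom seq i = [] := by
  fun_induction pvRunsFrom seq i with
  | case1 i h1 hv ih => rw [hall i] at hv; exact absurd hv (by simp)
  | case2 i h1 hv ih => exact ih
  | case3 i h1 => rfl

-- ===== VERDICT (by name: the statement is the Claim_ definition above) =====
theorem find_consecutive_spec : Claim_equal_find_consecutive := by
  intro seq delta mgl mgc hdom hpre
  unfold Spec_find_consecutive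
  rcases hpre with ⟨h1, h2⟩ | hno
  · rw [find_consecutive, pv_alt_eq,
      pv_outer_eq seq mgl mgc h1 h2 (seq.length + 1) 0 (by omega)]
  · have hall : ∀ j : Nat, seq.getD j false = false := by
      intro j
      by_cases hj : j < seq.length
      · rw [List.getD_eq_getElem seq false hj]
        cases hx : seq[j] with
        | false => rfl
        | true => exact absurd (hx ▸ List.getElem_mem hj) hno
      · exact List.getD_eq_default seq false (by omega)
    rw [find_consecutive, pv_alt_eq, pv_outer_notrue seq mgl mgc hall,
      pv_runsFrom_notrue seq hall 0]
    simp [pvMergeAll]
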